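-- pv_equiv track=rewrite | github.com/Acidburn0zzz/absd-install | part.py | str2bytes
-- ===== SOURCE A (Python) =====
-- import string
--
-- str2byte_sufs = {
--     'k': 1024,
--     'M': 1024*1024,
--     'G': 1024*1024*1024,
--     'T': 1024*1024*1024*1024,
-- }
--
-- def str2bytes(b, d=1):
--     """This does not floor the result and allows floating point values."""
--     b = str(b)
--     num = ''
--     mul = 1
--     for i in range(len(b)):
--         c = b[i]
--         if c == '.' or c in string.digits:
--             num += c
--             continue
--         if c == ',':
--             continue
--         mul = str2byte_sufs.get(c, 1)
--         break
--     return int(num) * mul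
-- ===== SOURCE B (Python) =====
-- import re
--
-- str2byte_sufs = {
--     'k': 1024,
--     'M': 1024*1024,
--     'G': 1024*1024*1024,
--     'T': 1024*1024*1024*1024,
-- }
--
-- def str2bytes(b, d=1):
--     """Parse-then-compute: split off the leading numeric run and the first
--     following character with one regex, then combine."""
--     m = re.match(r'([0-9.,]*)(.?)', str(b), re.DOTALL)
--     num = m.group(1).replace(',', '')
--     mul = str2byte_sufs.get(m.group(2), 1) if m.group(2) else 1
--     return int(num) * mul
-- ===== Notes on version B (the rewrite author's own statement) =====
-- stated objective: idiomatic
-- what changed: Replaces A's interleaved accumulate/break character loop with a parse-then-compute decomposition: one regex match splits off the leading [0-9.,] run and the first following character, then num and mul are built from the two groups.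
import Mathlib
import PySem

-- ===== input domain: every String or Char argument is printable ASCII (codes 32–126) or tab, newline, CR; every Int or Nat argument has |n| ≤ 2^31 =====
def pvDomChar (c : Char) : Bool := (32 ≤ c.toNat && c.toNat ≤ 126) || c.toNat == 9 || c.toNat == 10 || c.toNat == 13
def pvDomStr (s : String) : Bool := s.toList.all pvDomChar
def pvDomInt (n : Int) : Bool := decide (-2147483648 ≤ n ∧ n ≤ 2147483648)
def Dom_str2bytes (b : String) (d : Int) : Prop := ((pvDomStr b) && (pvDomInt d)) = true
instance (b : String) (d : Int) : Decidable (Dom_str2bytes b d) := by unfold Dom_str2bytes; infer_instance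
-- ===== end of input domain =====

-- B replaces A's interleaved accumulate/break character loop with a parse-then-compute
-- decomposition (split off the numeric run and the first following character, then combine);
-- objective: idiomatic.


-- ===== PORT A =====
-- module-level dict str2byte_sufs (keys are one-character strings; ported as Char keys)
def str2byte_sufs : PySem.Dict Char Int :=
  PySem.Dict.ofList [('k', 1024), ('M', 1048576), ('G', 1073741824), ('T', 1099511627776)]

-- A's for-loop with break: state = (num, mul); returns the state at loop exit
def str2bytesLoop : List Char → List Char → Int → (List Char × Int)
  | [], num, mul => (num, mul)
  | c :: rest, num, mul =>
    if c = '.' ∨ c.isDigit then str2bytesLoop rest (num ++ [c]) mul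
    else if c = ',' then str2bytesLoop rest num mul
    else (num, str2byte_sufs.getD c 1)

def str2bytes (b : String) (d : Int) : Int :=
  let s := str2bytesLoop b.toList [] 1
  (PySem.Int.ofChars? s.1).getD 0 * s.2   -- int(num): Pre_ excludes the ValueError (none) case

-- ===== PORT B =====
def str2bytes_alt (b : String) (d : Int) : Int :=
  let cs := b.toList
  -- re.match(r'([0-9.,]*)(.?)', b, DOTALL): greedy run of [0-9.,] then at most one char
  let g1 := cs.takeWhile (fun c => c.isDigit || c = '.' || c = ',')
  let g2 := (cs.drop g1.length).head?
  let num := g1.filter (fun c => c ≠ ',')          -- group(1).replace(',', '')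
  let mul := match g2 with
    | some c => str2byte_sufs.getD c 1             -- sufs.get(group(2), 1) when group(2) ≠ ''
    | none => 1
  (PySem.Int.ofChars? num).getD 0 * mul            -- int(num): Pre_ excludes the none case

-- ===== PRECONDITION & SPEC =====
-- Pre_ excludes exactly the inputs where Python's int(num) raises ValueError: the comma-free
-- leading [0-9.,] run must be nonempty and contain no '.' (i.e. contain a digit and no '.').
def Pre_str2bytes (b : String) (d : Int) : Prop :=
  (b.toList.takeWhile (fun c => c.isDigit || c = '.' || c = ',')).any (·.isDigit) ∧
  '.' ∉ b.toList.takeWhile (fun c => c.isDigit || c = '.' || c = ',')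
instance (b : String) (d : Int) : Decidable (Pre_str2bytes b d) := by unfold Pre_str2bytes; infer_instance

def pvWitness_str2bytes : String × Int := ("1,024k", 1)

def Spec_str2bytes (b : String) (d : Int) (out : Int) : Prop := out = str2bytes_alt b d
instance (b : String) (d : Int) (out : Int) : Decidable (Spec_str2bytes b d out) := by unfold Spec_str2bytes; infer_instance

-- ===== CLAIM (what is proved, stated in full; the proofs are below) =====
def Claim_equal_str2bytes : Prop := ∀ (b : String) (d : Int), Dom_str2bytes b d → Pre_str2bytes b d → Spec_str2bytes b d (str2bytes b d)

-- ===== LEMMAS AND PROOFS =====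

-- A's loop computes exactly B's (num, mul) decomposition, for any accumulator
lemma str2bytesLoop_eq (cs : List Char) : ∀ num : List Char,
    str2bytesLoop cs num 1 =
      (num ++ (cs.takeWhile (fun c => c.isDigit || c = '.' || c = ',')).filter (fun c => c ≠ ','),
       match (cs.drop (cs.takeWhile (fun c => c.isDigit || c = '.' || c = ',')).length).head? with
       | some c => str2byte_sufs.getD c 1
       | none => 1) := by
  induction cs with
  | nil => intro num; simp [str2bytesLoop]
  | cons c rest ih =>
    intro num
    by_cases h1 : c = '.' ∨ c.isDigit
    · have hq : (c.isDigit || c = '.' || c = ',') = true := by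
        rcases h1 with h | h <;> simp [h]
      have hc : ¬ c = ',' := by
        rcases h1 with h | h
        · simp [h]
        · intro hc; subst hc; simp [Char.isDigit] at h
      simp only [str2bytesLoop, if_pos h1, List.takeWhile_cons, hq, if_pos, List.filter_cons,
        decide_eq_true_eq]
      rw [ih (num ++ [c])]
      simp [hc]
    · by_cases h2 : c = ','
      · subst h2
        simp only [str2bytesLoop, if_neg h1, List.takeWhile_cons]
        rw [ih num]
        simp
      · have hq : (c.isDigit || c = '.' || c = ',') = false := by
          simp only [Bool.or_eq_false_iff]
          refine ⟨⟨?_, ?_⟩, ?_⟩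
          · simpa using fun h => h1 (Or.inr h)
          · simpa using fun h => h1 (Or.inl h)
          · simpa using h2
        simp [str2bytesLoop, if_neg h1, if_neg h2, hq]

-- ===== VERDICT (by name: the statement is the Claim_ definition above) =====
theorem str2bytes_spec : Claim_equal_str2bytes := by
  intro b d _ _
  unfold Spec_str2bytes str2bytes str2bytes_alt
  rw [str2bytesLoop_eq b.toList []]
  simp
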